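-- pv_equiv track=rewrite | github.com/MicrobialDarkMatter/Fishnchips_basecaller | src/controllers/assembly_controller.py | trim_column
-- ===== SOURCE A (Python) =====
-- def trim_column(str_column):
--     m = -1
--     n = -1
--     for i,char in enumerate(str_column):
--         if char in 'actg':
--             m = i
--             break
--     for i,char in reversed(list(enumerate(str_column))):
--         if char in 'actg':
--             n = i
--             break
--     return str_column[m:n+1]
-- ===== SOURCE B (Python) =====
-- def trim_column(str_column):
--     chars = list(str_column)
--     while chars and chars[-1] not in 'actg':
--         chars.pop()
--     chars.reverse()
--     while chars and chars[-1] not in 'actg':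
--         chars.pop()
--     chars.reverse()
--     return ''.join(chars)
-- ===== Notes on version B (the rewrite author's own statement) =====
-- stated objective: simpler
-- what changed: B trims by popping non-nucleotide characters off the tail (pop, reverse, pop, reverse) instead of A's two index-finding scans over enumerate/reversed(list(enumerate)) plus a slice with -1 sentinels.
import Mathlib
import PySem

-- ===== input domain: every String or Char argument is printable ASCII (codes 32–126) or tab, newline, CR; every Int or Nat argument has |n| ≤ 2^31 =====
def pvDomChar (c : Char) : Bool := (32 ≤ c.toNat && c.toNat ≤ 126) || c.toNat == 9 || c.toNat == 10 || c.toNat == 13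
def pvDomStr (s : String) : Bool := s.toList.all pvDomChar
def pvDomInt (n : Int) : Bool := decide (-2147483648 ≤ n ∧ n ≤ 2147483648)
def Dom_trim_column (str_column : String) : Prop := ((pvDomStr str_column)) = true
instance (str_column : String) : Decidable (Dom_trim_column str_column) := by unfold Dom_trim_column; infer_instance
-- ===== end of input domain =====

-- B trims the string by popping non-nucleotide characters off the end (then reversing
-- and popping the other end) instead of A's two index-finding scans over enumerate
-- plus a slice with -1 sentinels; objective: simpler decomposition.

-- ===== PORT A =====
-- `char in 'actg'` for the single character `char`: exactly membership among 'a','c','t','g'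
def pvInActgA (c : Char) : Bool := c ∈ "actg".toList
-- A's two loops are the same scan: walk the (index, char) pairs, on the first hit
-- return that index (the `break`), otherwise leave the initial -1
def pvFirstHitA : List (Int × Char) → Int → Int
  | [], m => m
  | (i, c) :: rest, m => if pvInActgA c then i else pvFirstHitA rest m

def trim_column (str_column : String) : String :=
  let m := pvFirstHitA (PySem.List.enumerate str_column.toList 0) (-1)
  let n := pvFirstHitA ((PySem.List.enumerate str_column.toList 0).reverse) (-1)
  PySem.Str.slice str_column (some m) (some (n + 1))

-- ===== PORT B =====
-- `chars[-1] not in 'actg'` for the single character: not one of 'a','c','t','g'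
def pvIsNucB (c : Char) : Bool := c == 'a' || c == 'c' || c == 't' || c == 'g'
-- Source B's `while chars and chars[-1] not in 'actg': chars.pop()`
def pvPopBackB (l : List Char) : List Char :=
  if hl : l = [] then []
  else if !pvIsNucB (l.getLast hl) then pvPopBackB l.dropLast else l
termination_by l.length
decreasing_by
  have := List.length_pos_of_ne_nil hl
  simp [List.length_dropLast]
  omega

def trim_column_alt (str_column : String) : String :=
  let chars := str_column.toList
  let chars := pvPopBackB chars
  let chars := chars.reverse
  let chars := pvPopBackB chars
  let chars := chars.reverse
  String.ofList chars  -- ''.join(chars) over single characters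

-- ===== PRECONDITION & SPEC =====
def Spec_trim_column (str_column : String) (out : String) : Prop := out = trim_column_alt str_column
instance (str_column : String) (out : String) : Decidable (Spec_trim_column str_column out) := by unfold Spec_trim_column; infer_instance

-- ===== CLAIM (what is proved, stated in full; the proofs are below) =====
def Claim_equal_trim_column : Prop := ∀ (str_column : String), Dom_trim_column str_column → Spec_trim_column str_column (trim_column str_column)

-- ===== LEMMAS AND PROOFS =====

theorem pvInActgA_eq (c : Char) : pvInActgA c = pvIsNucB c := by
  have h : "actg".toList = ['a', 'c', 't', 'g'] := rfl
  have hd : ∀ (a : Char), (decide (c = a)) = (c == a) := by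
    intro a; cases h2 : c == a <;> simp_all
  simp [pvInActgA, pvIsNucB, h, List.mem_cons, Bool.or_assoc, hd]

-- the scan over a miss-only list leaves the accumulator
theorem pvFirstHitA_miss (l : List (Int × Char)) (m : Int)
    (h : ∀ x ∈ l, pvInActgA x.2 = false) : pvFirstHitA l m = m := by
  induction l with
  | nil => rfl
  | cons x rest ih =>
    obtain ⟨i, c⟩ := x
    simp only [pvFirstHitA, h (i, c) (by simp)]
    exact ih fun y hy => h y (by simp [hy])

theorem pvFirstHitA_append_miss (l1 l2 : List (Int × Char)) (m : Int)
    (h : ∀ x ∈ l1, pvInActgA x.2 = false) :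
    pvFirstHitA (l1 ++ l2) m = pvFirstHitA l2 m := by
  induction l1 with
  | nil => rfl
  | cons x rest ih =>
    obtain ⟨i, c⟩ := x
    simp only [List.cons_append, pvFirstHitA, h (i, c) (by simp)]
    exact ih fun y hy => h y (by simp [hy])

theorem pvFirstHitA_hit (i : Int) (c : Char) (l : List (Int × Char)) (m : Int)
    (h : pvInActgA c = true) : pvFirstHitA ((i, c) :: l) m = i := by
  simp [pvFirstHitA, h]

theorem pvEnumerate_append (xs ys : List Char) (s : Int) :
    PySem.List.enumerate (xs ++ ys) s
      = PySem.List.enumerate xs s ++ PySem.List.enumerate ys (s + xs.length) := by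
  induction xs generalizing s with
  | nil => simp [PySem.List.enumerate]
  | cons x t ih =>
    simp only [List.cons_append, PySem.List.enumerate_cons, ih (s + 1), List.length_cons]
    congr 3
    push_cast
    ring

theorem pvSnd_mem_of_mem_enumerate {x : Int × Char} {xs : List Char} {s : Int}
    (h : x ∈ PySem.List.enumerate xs s) : x.2 ∈ xs := by
  have := List.mem_map_of_mem (f := fun y : Int × Char => y.2) h
  rwa [PySem.List.map_snd_enumerate] at this

-- split a list containing a nucleotide at its FIRST nucleotide
theorem pvSplit_first (l : List Char) (h : l.any pvIsNucB = true) :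
    ∃ u a v, l = u ++ a :: v ∧ (∀ x ∈ u, pvIsNucB x = false) ∧ pvIsNucB a = true := by
  induction l with
  | nil => simp at h
  | cons x t ih =>
    by_cases hx : pvIsNucB x = true
    · exact ⟨[], x, t, by simp, by simp, hx⟩
    · have ht : t.any pvIsNucB = true := by
        simp only [List.any_cons, Bool.eq_false_iff.mpr hx, Bool.false_or] at h
        exact h
      obtain ⟨u, a, v, h1, h2, h3⟩ := ih ht
      exact ⟨x :: u, a, v, by simp [h1], by
        intro y hy
        rcases List.mem_cons.mp hy with rfl | hy'
        · exact Bool.eq_false_iff.mpr hx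
        · exact h2 y hy', h3⟩

-- the back-popping loop is dropWhile on the reversed list
theorem pvPopBackB_eq (l : List Char) :
    pvPopBackB l = (l.reverse.dropWhile (fun c => !pvIsNucB c)).reverse := by
  induction l using List.reverseRecOn with
  | nil => rw [pvPopBackB]; simp
  | append_singleton init a ih =>
    rw [pvPopBackB]
    rw [dif_neg (by simp : init ++ [a] ≠ [])]
    by_cases ha : pvIsNucB a = true
    · rw [if_neg (by simp [ha])]
      simp [ha]
    · rw [if_pos (by simp at ha; simp [ha])]
      rw [List.dropLast_concat, ih]
      simp [ha]

theorem pvDropWhile_miss_append (u l : List Char) (h : ∀ x ∈ u, pvIsNucB x = false) :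
    (u ++ l).dropWhile (fun c => !pvIsNucB c) = l.dropWhile (fun c => !pvIsNucB c) := by
  induction u with
  | nil => rfl
  | cons x t ih =>
    rw [List.cons_append, List.dropWhile_cons, if_pos (by simp [h x (by simp)])]
    exact ih fun y hy => h y (by simp [hy])

theorem pvDropWhile_hit (c : Char) (l : List Char) (h : pvIsNucB c = true) :
    (c :: l).dropWhile (fun x => !pvIsNucB x) = c :: l := by
  simp [h]

theorem pvStrSlice_eq (s : String) (a b : Option Int) :
    PySem.Str.slice s a b = String.ofList (PySem.List.slice s.toList a b) := by
  simp [PySem.Str.slice]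

-- ===== VERDICT (by name: the statement is the Claim_ definition above) =====
theorem trim_column_spec : Claim_equal_trim_column := by
  intro s _
  unfold Spec_trim_column trim_column trim_column_alt
  simp only [pvStrSlice_eq]
  set cs := s.toList with hcs
  -- B's value, rewritten through pvPopBackB_eq
  have hBval : ((pvPopBackB ((pvPopBackB cs).reverse)).reverse : List Char)
      = ((cs.reverse.dropWhile (fun c => !pvIsNucB c)).reverse).dropWhile (fun c => !pvIsNucB c) := by
    rw [pvPopBackB_eq cs, List.reverse_reverse, pvPopBackB_eq, List.reverse_reverse]
  by_cases hany : cs.any pvIsNucB = true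
  · -- there is at least one nucleotide
    obtain ⟨u0, c0, v0, hA, hu0, hc0⟩ := pvSplit_first cs hany
    have hanyr : cs.reverse.any pvIsNucB = true := by
      rw [List.any_eq_true] at hany ⊢; simpa using hany
    obtain ⟨w0, c1, u1, hBr, hw0, hc1⟩ := pvSplit_first cs.reverse hanyr
    have hB : cs = u1.reverse ++ c1 :: w0.reverse := by
      have h0 : cs = cs.reverse.reverse := by simp
      rw [h0, hBr]; simp
    set w := u1.reverse with hw
    -- m = first index, n = last index
    have hm : pvFirstHitA (PySem.List.enumerate cs 0) (-1) = (u0.length : Int) := by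
      rw [hA, pvEnumerate_append, pvFirstHitA_append_miss _ _ _
        (fun x hx => by rw [pvInActgA_eq]; exact hu0 _ (pvSnd_mem_of_mem_enumerate hx))]
      rw [PySem.List.enumerate_cons, pvFirstHitA_hit _ _ _ _ (by rw [pvInActgA_eq]; exact hc1 ▸ hc0)]
      simp
    have hn : pvFirstHitA (PySem.List.enumerate cs 0).reverse (-1) = (w.length : Int) := by
      rw [hB, pvEnumerate_append, PySem.List.enumerate_cons, List.reverse_append,
        List.reverse_cons]
      rw [List.append_assoc, pvFirstHitA_append_miss _ _ _
        (fun x hx => by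
          rw [pvInActgA_eq]
          have hx2 : x.2 ∈ w0.reverse := pvSnd_mem_of_mem_enumerate (by simpa using hx)
          exact hw0 _ (List.mem_reverse.mp hx2))]
      rw [List.singleton_append, pvFirstHitA_hit _ _ _ _ (by rw [pvInActgA_eq]; exact hc1)]
      simp [hw]
    rw [hm, hn, hBval]
    -- first nucleotide index ≤ last nucleotide index
    have hle : u0.length ≤ w.length := by
      by_contra hcon
      have hlt : w.length < u0.length := Nat.lt_of_not_le hcon
      have hbound : w.length < cs.length := by rw [hB]; simp
      have h1 : cs[w.length]'hbound = c1 := by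
        rw [List.getElem_of_eq hB, List.getElem_append_right (by omega)]
        simp
      have h2 : cs[w.length]'hbound ∈ u0 := by
        rw [List.getElem_of_eq hA, List.getElem_append_left hlt]
        exact List.getElem_mem _
      rw [h1] at h2
      rw [hu0 _ h2] at hc1
      exact Bool.false_ne_true hc1
    -- evaluate the slice:  cs[m : n+1] = (cs.drop m).take (n + 1 - m)
    rw [show ((w.length : Int) + 1) = ((w.length + 1 : Nat) : Int) by push_cast; ring]
    rw [PySem.List.slice_toNat cs (by positivity) (by positivity)]
    simp only [Int.toNat_natCast]
    -- B's chain
    have e1 : cs.reverse.dropWhile (fun c => !pvIsNucB c) = c1 :: u1 := by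
      rw [hBr, pvDropWhile_miss_append _ _ hw0, pvDropWhile_hit _ _ hc1]
    rw [e1, List.reverse_cons]
    -- shared facts
    have hds : c0 :: v0 = cs.drop u0.length := by rw [hA]; simp
    have hds2 : cs.drop u0.length = w.drop u0.length ++ c1 :: w0.reverse := by
      rw [hB, List.drop_append, Nat.sub_eq_zero_of_le hle, List.drop_zero]
    have htk : w.take u0.length = u0 := by
      have h1 : cs.take u0.length = u0 := by rw [hA]; simp
      have h2 : cs.take u0.length = w.take u0.length := by
        rw [hB, List.take_append, Nat.sub_eq_zero_of_le hle, List.take_zero, List.append_nil]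
      rw [← h2, h1]
    cases hrest : w.drop u0.length with
    | nil =>
      -- the first and last nucleotide coincide
      have hwle : w.length ≤ u0.length := List.drop_eq_nil_iff.mp hrest
      have hwu0 : w = u0 := by
        rw [← htk, List.take_of_length_le hwle]
      have hcnt : w.length + 1 - u0.length = 1 := by omega
      rw [hds2, hrest, List.nil_append, hcnt]
      rw [← hw, hwu0, pvDropWhile_miss_append _ _ hu0, pvDropWhile_hit _ _ hc1]
      simp
    | cons x xs =>
      -- x is the first nucleotide c0
      have hxc0 : x = c0 := by
        have := hds.trans hds2
        rw [hrest] at this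
        simpa using (List.cons.injEq .. ▸ this).1.symm
      have hwsplit : w = u0 ++ x :: xs := by
        rw [← htk, ← hrest, List.take_append_drop]
      have hwlen : w.length = u0.length + xs.length + 1 := by
        rw [hwsplit]; simp; omega
      have hcnt : w.length + 1 - u0.length = xs.length + 2 := by omega
      rw [hds2, hrest, hcnt]
      -- B: drop the leading misses, stop at the nucleotide x
      have hB2 : (u1.reverse ++ [c1]).dropWhile (fun c => !pvIsNucB c) = x :: (xs ++ [c1]) := by
        have : u1.reverse ++ [c1] = u0 ++ (x :: (xs ++ [c1])) := by
          rw [← hw, hwsplit]; simp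
        rw [this, pvDropWhile_miss_append _ _ hu0,
          pvDropWhile_hit _ _ (by rw [hxc0]; exact hc0)]
      rw [hB2]
      -- A: take xs.length + 2 of x :: (xs ++ c1 :: w0.reverse)
      congr 1
      rw [List.cons_append, List.take_succ_cons]
      congr 1
      rw [List.take_append, List.take_of_length_le (by omega),
        show xs.length + 1 - xs.length = 1 by omega]
      simp
  · -- no nucleotide at all: A slices [-1:0] = '', B pops everything away
    have hall : ∀ x ∈ cs, pvIsNucB x = false := by
      intro x hx
      by_contra hxx
      exact hany (List.any_eq_true.mpr ⟨x, hx, by simpa using hxx⟩)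
    have hm : pvFirstHitA (PySem.List.enumerate cs 0) (-1) = -1 :=
      pvFirstHitA_miss _ _ (fun x hx => by
        rw [pvInActgA_eq]; exact hall _ (pvSnd_mem_of_mem_enumerate hx))
    have hn : pvFirstHitA (PySem.List.enumerate cs 0).reverse (-1) = -1 :=
      pvFirstHitA_miss _ _ (fun x hx => by
        rw [pvInActgA_eq]; exact hall _ (pvSnd_mem_of_mem_enumerate (List.mem_reverse.mp hx)))
    rw [hm, hn, hBval]
    have hAnil : PySem.List.slice cs (some (-1)) (some (-1 + 1)) = [] := by
      apply List.eq_nil_of_length_eq_zero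
      rw [show (-1 : Int) + 1 = 0 by ring, PySem.List.length_slice]
      have h0 : PySem.List.clampIdx cs.length 0 = 0 := by
        simp
      omega
    rw [hAnil]
    have hBnil : cs.reverse.dropWhile (fun c => !pvIsNucB c) = [] := by
      rw [List.dropWhile_eq_nil_iff]
      intro x hx
      simp [hall _ (List.mem_reverse.mp hx)]
    rw [hBnil]
    simp
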